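-- pv_equiv track=rewrite | github.com/jenshobo/OMV_content_parser | main.py | generate_fallback_titles
-- ===== SOURCE A (Python) =====
-- def generate_fallback_titles(title):
--     parts = title.strip().split()
--     fallback_titles = []
--     while len(parts) > 1:
--         fallback_titles.append(' '.join(parts))
--         parts.pop()
--     if len(parts) == 1:
--         fallback_titles.append(' '.join(parts))
--     return fallback_titles
-- ===== SOURCE B (Python) =====
-- def generate_fallback_titles(title):
--     # Incremental one-pass build: grow a running prefix string word by word
--     # (shortest to longest), then reverse so the full title comes first.
--     words = title.strip().split()
--     if not words:
--         return []
--     cur = words[0]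
--     prefixes = [cur]
--     for w in words[1:]:
--         cur = cur + ' ' + w
--         prefixes.append(cur)
--     prefixes.reverse()
--     return prefixes
-- ===== Notes on version B (the rewrite author's own statement) =====
-- stated objective: alternative
-- what changed: Instead of repeatedly joining and popping the shrinking word list (quadratic re-joins, back-to-front), B makes one forward pass growing a running prefix string, collecting prefixes shortest-to-longest, and reverses the list at the end.
import Mathlib
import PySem

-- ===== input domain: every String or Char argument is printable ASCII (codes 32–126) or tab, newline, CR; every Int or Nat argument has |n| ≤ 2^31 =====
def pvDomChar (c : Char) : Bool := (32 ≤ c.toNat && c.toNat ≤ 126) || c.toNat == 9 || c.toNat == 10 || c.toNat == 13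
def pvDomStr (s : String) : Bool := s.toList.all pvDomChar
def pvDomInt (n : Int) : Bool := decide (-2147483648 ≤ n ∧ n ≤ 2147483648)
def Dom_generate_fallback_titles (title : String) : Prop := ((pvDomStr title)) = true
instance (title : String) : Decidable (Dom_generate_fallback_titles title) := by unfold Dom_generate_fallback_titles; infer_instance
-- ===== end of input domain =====

-- B replaces A's pop-and-rejoin loop over the shrinking word list by one forward pass
-- that grows a running prefix string and reverses the collected prefixes at the end.

-- ===== PORT A =====
-- while len(parts) > 1: append ' '.join(parts); parts.pop()  /  then the len == 1 case
def pvALoop (parts : List String) (acc : List String) : List String :=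
  if parts.length > 1 then
    pvALoop parts.dropLast (acc ++ [PySem.Str.join " " parts])
  else if parts.length = 1 then
    acc ++ [PySem.Str.join " " parts]
  else acc
termination_by parts.length
decreasing_by simp [List.length_dropLast]; omega

def generate_fallback_titles (title : String) : List String :=
  pvALoop (PySem.Str.split₀ (PySem.Str.strip title)) []

-- ===== PORT B =====
-- fold over the tail words with state (cur, prefixes); then reverse
def generate_fallback_titles_alt (title : String) : List String :=
  match PySem.Str.split₀ (PySem.Str.strip title) with
  | [] => []
  | w0 :: rest =>
      let st := rest.foldl
        (fun (st : String × List String) w =>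
          let cur := st.1 ++ " " ++ w
          (cur, st.2 ++ [cur]))
        (w0, [w0])
      st.2.reverse

-- ===== PRECONDITION & SPEC =====
def Spec_generate_fallback_titles (title : String) (out : List String) : Prop := out = generate_fallback_titles_alt title
instance (title : String) (out : List String) : Decidable (Spec_generate_fallback_titles title out) := by unfold Spec_generate_fallback_titles; infer_instance

-- ===== CLAIM (what is proved, stated in full; the proofs are below) =====
def Claim_equal_generate_fallback_titles : Prop := ∀ (title : String), Dom_generate_fallback_titles title → Spec_generate_fallback_titles title (generate_fallback_titles title)

-- ===== LEMMAS AND PROOFS =====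

-- joins of all nonempty prefixes of ws, shortest first
def pvPrefJoins (ws : List String) : List String :=
  (List.range ws.length).map (fun i => PySem.Str.join " " (ws.take (i + 1)))

theorem pvCharsJoinSnoc (sep q : List Char) (ps : List (List Char)) (h : ps ≠ []) :
    PySem.Chars.join sep (ps ++ [q]) = PySem.Chars.join sep ps ++ sep ++ q := by
  induction ps with
  | nil => exact absurd rfl h
  | cons p ps ih =>
    cases ps with
    | nil => simp [PySem.Chars.join_cons_cons, PySem.Chars.join_singleton]
    | cons p' ps' =>
      simp only [List.cons_append] at ih ⊢
      rw [PySem.Chars.join_cons_cons, ih (by simp)]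
      simp [PySem.Chars.join_cons_cons]

theorem pvJoinSnoc (xs : List String) (w : String) (h : xs ≠ []) :
    PySem.Str.join " " (xs ++ [w]) = PySem.Str.join " " xs ++ " " ++ w := by
  apply String.toList_inj.mp
  simp only [PySem.Str.toList_join, String.toList_append, List.map_append, List.map_cons,
    List.map_nil]
  rw [pvCharsJoinSnoc _ _ _ (by simpa using h)]

theorem pvPrefJoins_snoc (xs : List String) (w : String) :
    pvPrefJoins (xs ++ [w]) = pvPrefJoins xs ++ [PySem.Str.join " " (xs ++ [w])] := by
  unfold pvPrefJoins
  rw [List.length_append, List.length_cons, List.length_nil, List.range_succ, List.map_append]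
  congr 1
  · apply List.map_congr_left
    intro i hi
    simp only [List.mem_range] at hi
    rw [List.take_append_of_le_length (by omega)]
  · simp only [List.map_cons, List.map_nil]
    congr 2
    rw [List.take_of_length_le (by simp)]

theorem pvJoin_single (w : String) : PySem.Str.join " " [w] = w := by
  apply String.toList_inj.mp
  simp [PySem.Str.toList_join, PySem.Chars.join_singleton]

theorem pvALoop_eq (n : Nat) (parts acc : List String) (h : parts.length ≤ n) :
    pvALoop parts acc = acc ++ (pvPrefJoins parts).reverse := by
  induction n generalizing parts acc with
  | zero =>
    have : parts = [] := List.eq_nil_of_length_eq_zero (by omega)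
    subst this
    rw [pvALoop]
    simp [pvPrefJoins]
  | succ n ih =>
    rw [pvALoop]
    split_ifs with h1 h2
    · have hne : parts ≠ [] := by intro hc; subst hc; simp at h1
      have hparts := List.dropLast_concat_getLast hne
      rw [ih parts.dropLast _ (by simp [List.length_dropLast]; omega)]
      conv_rhs => rw [← hparts, pvPrefJoins_snoc]
      rw [hparts]
      simp
    · obtain ⟨w, rfl⟩ := List.length_eq_one_iff.mp h2
      simp [pvPrefJoins, List.range_succ, pvJoin_single]
    · have : parts = [] := List.eq_nil_of_length_eq_zero (by omega)
      subst this
      simp [pvPrefJoins]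

theorem pvBFold (rest pre : List String) (h : pre ≠ []) :
    rest.foldl
      (fun (st : String × List String) w =>
        let cur := st.1 ++ " " ++ w
        (cur, st.2 ++ [cur]))
      (PySem.Str.join " " pre, pvPrefJoins pre)
    = (PySem.Str.join " " (pre ++ rest), pvPrefJoins (pre ++ rest)) := by
  induction rest generalizing pre with
  | nil => simp
  | cons w rs ih =>
    rw [List.foldl_cons]
    have h1 : PySem.Str.join " " pre ++ " " ++ w = PySem.Str.join " " (pre ++ [w]) :=
      (pvJoinSnoc pre w h).symm
    have h2 : pvPrefJoins pre ++ [PySem.Str.join " " (pre ++ [w])]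
        = pvPrefJoins (pre ++ [w]) := (pvPrefJoins_snoc pre w).symm
    simp only [h1, h2]
    rw [ih (pre ++ [w]) (by simp)]
    simp

-- ===== VERDICT (by name: the statement is the Claim_ definition above) =====
theorem generate_fallback_titles_spec : Claim_equal_generate_fallback_titles := by
  intro title _
  unfold Spec_generate_fallback_titles generate_fallback_titles generate_fallback_titles_alt
  cases hws : PySem.Str.split₀ (PySem.Str.strip title) with
  | nil => rw [pvALoop]; simp
  | cons w0 rest =>
    rw [pvALoop_eq (w0 :: rest).length _ _ le_rfl]
    have hinit : ((w0 : String), ([w0] : List String))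
        = (PySem.Str.join " " [w0], pvPrefJoins [w0]) := by
      simp [pvJoin_single, pvPrefJoins, List.range_succ]
    simp only [hinit]
    rw [pvBFold rest [w0] (by simp)]
    simp
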